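-- pv_equiv track=rewrite | github.com/Peter-Blohm/discovering_opinion_intervals | enumerate_cycles.py | _backtrack_missing_edges_iterative
-- ===== SOURCE A (Python) =====
-- def _backtrack_missing_edges_iterative(ordered_cycle, missing_edges, edges_to_place):
--     """
--     Iterative backtracking function with memoization.
--     """
--     memo = {}
--     stack = []
--     initial_state = {
--         'left_ptr': 1,
--         'right_ptr': -1,
--         'edges_to_place': edges_to_place,
--         'state': 'new',
--     }
--     stack.append(initial_state)
--
--     while stack:
--         frame = stack[-1]
--         left_ptr = frame['left_ptr']
--         right_ptr = frame['right_ptr'] % len(ordered_cycle)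
--         edges_to_place = frame['edges_to_place']
--         key = (left_ptr, right_ptr)
--
--         if key in memo:
--             if memo[key]:
--                 return True
--             else:
--                 stack.pop()
--                 continue
--
--         if edges_to_place == 0:
--             memo[key] = True
--             return True
--
--         if left_ptr >= right_ptr:
--             memo[key] = False
--             stack.pop()
--             continue
--
--         if frame['state'] == 'new':
--             options = []
--
--             left_vertex = ordered_cycle[left_ptr]
--             right_vertex = ordered_cycle[right_ptr]
--             next_right_vertex = ordered_cycle[(right_ptr - 1) % len(ordered_cycle)]
--             next_left_vertex = ordered_cycle[(left_ptr + 1) % len(ordered_cycle)]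
--
--             option1 = (min(left_vertex, next_right_vertex), max(left_vertex, next_right_vertex))
--             option2 = (min(right_vertex, next_left_vertex), max(right_vertex, next_left_vertex))
--
--             options_list = []
--             if option1 in missing_edges:
--                 options_list.append(('left_to_right', option1))
--             if option2 in missing_edges:
--                 options_list.append(('right_to_left', option2))
--
--             frame['options'] = options_list
--             frame['option_index'] = 0
--             frame['state'] = 'options'
--
--         options = frame['options']
--         option_index = frame['option_index']
--
--         if option_index >= len(options):
--             memo[key] = False
--             stack.pop()
--             continue
--
--         option_type, edge = options[option_index]
--         frame['option_index'] += 1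
--
--         if option_type == 'left_to_right':
--             new_left_ptr = left_ptr
--             new_right_ptr = (right_ptr - 1) % len(ordered_cycle)
--         elif option_type == 'right_to_left':
--             new_left_ptr = (left_ptr + 1) % len(ordered_cycle)
--             new_right_ptr = right_ptr
--
--         # Check memoization before pushing new state
--         new_key = (new_left_ptr, new_right_ptr)
--         if new_key in memo and memo[new_key] == False:
--             continue
--
--         new_frame = {
--             'left_ptr': new_left_ptr,
--             'right_ptr': new_right_ptr,
--             'edges_to_place': edges_to_place - 1,
--             'state': 'new',
--         }
--         stack.append(new_frame)
--
--     return False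
-- ===== SOURCE B (Python) =====
-- def _backtrack_missing_edges_iterative(ordered_cycle, missing_edges, edges_to_place):
--     """Recursive memoized re-implementation (same results as the iterative stack machine)."""
--     n = len(ordered_cycle)
--     memo = {}
--
--     def rec(left_ptr, right_ptr, etp):
--         rp = right_ptr % n
--         key = (left_ptr, rp)
--         if key in memo:
--             return memo[key]
--         if etp == 0:
--             return True
--         if left_ptr >= rp:
--             memo[key] = False
--             return False
--         left_vertex = ordered_cycle[left_ptr]
--         right_vertex = ordered_cycle[rp]
--         next_right_vertex = ordered_cycle[rp - 1]
--         next_left_vertex = ordered_cycle[(left_ptr + 1) % n]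
--         option1 = (min(left_vertex, next_right_vertex), max(left_vertex, next_right_vertex))
--         option2 = (min(right_vertex, next_left_vertex), max(right_vertex, next_left_vertex))
--         ok = (option1 in missing_edges and rec(left_ptr, rp - 1, etp - 1)) or \
--              (option2 in missing_edges and rec(left_ptr + 1, rp, etp - 1))
--         memo[key] = ok
--         return ok
--
--     return rec(1, -1, edges_to_place)
-- ===== Notes on version B (the rewrite author's own statement) =====
-- stated objective: simpler
-- what changed: Replaces A's explicit stack machine (a while loop over mutable frame dicts with 'new'/'options' states and option indices) by a direct recursive memoized function on the two pointers that tries the two candidate edges with short-circuit or.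
import Mathlib
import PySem

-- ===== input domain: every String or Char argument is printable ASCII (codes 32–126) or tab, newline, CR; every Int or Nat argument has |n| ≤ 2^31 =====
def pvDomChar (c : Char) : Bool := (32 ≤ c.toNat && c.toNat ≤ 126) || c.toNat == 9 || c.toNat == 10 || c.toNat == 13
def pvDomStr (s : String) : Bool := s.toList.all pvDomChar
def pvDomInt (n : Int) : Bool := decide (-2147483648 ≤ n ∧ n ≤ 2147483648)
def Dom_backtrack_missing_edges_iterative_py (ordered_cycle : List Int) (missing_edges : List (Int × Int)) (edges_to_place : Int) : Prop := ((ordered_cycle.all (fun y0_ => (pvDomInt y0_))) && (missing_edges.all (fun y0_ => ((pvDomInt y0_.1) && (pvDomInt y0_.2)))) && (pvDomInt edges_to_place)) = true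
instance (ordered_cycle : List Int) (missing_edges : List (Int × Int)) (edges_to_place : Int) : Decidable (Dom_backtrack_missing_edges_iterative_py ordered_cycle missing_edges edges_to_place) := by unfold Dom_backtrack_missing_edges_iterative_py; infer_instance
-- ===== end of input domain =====

-- B replaces A's explicit stack machine (mutable frame dicts, states 'new'/'options', option indices)
-- by a direct memoized recursion on the two pointers; objective: simpler, same results.

-- ===== PORT A =====
-- one stack frame of A's iterative machine ('options'/'option_index' only meaningful once state = "options")
structure PvFrame where
  left_ptr : Int
  right_ptr : Int
  edges_to_place : Int
  state : String
  options : List (String × Int × Int)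
  option_index : Int
deriving DecidableEq, Repr

-- options_list computed in A's 'new' state: (tag, edge) with the edge endpoints flattened into the triple
def pvOptionsList (cyc : List Int) (me : List (Int × Int)) (l rp : Int) : List (String × Int × Int) :=
  let n : Int := cyc.length
  let lv := (PySem.List.pyGet? cyc l).getD 0          -- in range for every reachable frame (0 ≤ l < rp < n)
  let rv := (PySem.List.pyGet? cyc rp).getD 0
  let nrv := (PySem.List.pyGet? cyc (PySem.Int.mod (rp - 1) n)).getD 0
  let nlv := (PySem.List.pyGet? cyc (PySem.Int.mod (l + 1) n)).getD 0
  let o1 := (min lv nrv, max lv nrv)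
  let o2 := (min rv nlv, max rv nlv)
  (if me.contains o1 then [("left_to_right", o1.1, o1.2)] else []) ++
  (if me.contains o2 then [("right_to_left", o2.1, o2.2)] else [])

-- the body of A's while loop: either `return` a result (.inl) or continue with a new stack and memo (.inr)
def pvStep (cyc : List Int) (me : List (Int × Int)) (frame : PvFrame) (rest : List PvFrame)
    (memo : PySem.Dict (Int × Int) Bool) : Bool ⊕ (List PvFrame × PySem.Dict (Int × Int) Bool) :=
  let n : Int := cyc.length
  let l := frame.left_ptr
  let rp := PySem.Int.mod frame.right_ptr n
  let etp := frame.edges_to_place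
  let key := (l, rp)
  match memo.get? key with
  | some v => if v then .inl true else .inr (rest, memo)
  | none =>
    if etp = 0 then .inl true                         -- memo[key] = True; return True (the write is dead)
    else if l ≥ rp then .inr (rest, memo.insert key false)
    else
      let frame1 := if frame.state = "new"
        then { frame with options := pvOptionsList cyc me l rp, option_index := 0, state := "options" }
        else frame
      let opts := frame1.options
      let oi := frame1.option_index
      if oi ≥ (opts.length : Int) then .inr (rest, memo.insert key false)
      else
        let opt := (PySem.List.pyGet? opts oi).getD ("", 0, 0)   -- in range: oi < len(opts)
        let frame2 := { frame1 with option_index := oi + 1 }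
        let nl := if opt.1 = "left_to_right" then l else PySem.Int.mod (l + 1) n
        let nr := if opt.1 = "left_to_right" then PySem.Int.mod (rp - 1) n else rp
        match memo.get? (nl, nr) with
        | some v =>
          if v = false then .inr (frame2 :: rest, memo)
          else .inr (⟨nl, nr, etp - 1, "new", [], 0⟩ :: frame2 :: rest, memo)
        | none => .inr (⟨nl, nr, etp - 1, "new", [], 0⟩ :: frame2 :: rest, memo)

-- generous fuel for the while loop (the equivalence proof shows it is never exhausted when the cycle is nonempty)
def pvFuelA : Nat → Nat
  | 0 => 4
  | g + 1 => 2 * pvFuelA g + 4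

-- the while loop of A, fuel-guarded; none = fuel exhausted (proved unreachable under Pre_)
def pvLoopA (cyc : List Int) (me : List (Int × Int)) : Nat → List PvFrame → PySem.Dict (Int × Int) Bool → Option Bool
  | 0, _, _ => none
  | _ + 1, [], _ => some false
  | f + 1, frame :: rest, memo =>
    match pvStep cyc me frame rest memo with
    | .inl b => some b
    | .inr (s', m') => pvLoopA cyc me f s' m'

def backtrack_missing_edges_iterative_py (ordered_cycle : List Int) (missing_edges : List (Int × Int)) (edges_to_place : Int) : Bool :=
  (pvLoopA ordered_cycle missing_edges (pvFuelA ordered_cycle.length + 1)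
    [⟨1, -1, edges_to_place, "new", [], 0⟩] PySem.Dict.empty).getD false

-- ===== PORT B =====
-- B's inner `rec`, memo threaded through; fuel = recursion-depth guard (never exhausted: depth ≤ pointer gap < fuel)
def pvRec (cyc : List Int) (me : List (Int × Int)) : Nat → Int → Int → Int → PySem.Dict (Int × Int) Bool → Bool × PySem.Dict (Int × Int) Bool
  | 0, _, _, _, m => (false, m)
  | f + 1, l, r, etp, m =>
    let n : Int := cyc.length
    let rp := PySem.Int.mod r n
    let key := (l, rp)
    match m.get? key with
    | some v => (v, m)
    | none =>
      if etp = 0 then (true, m)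
      else if l ≥ rp then (false, m.insert key false)
      else
        let lv := (PySem.List.pyGet? cyc l).getD 0    -- in range for every reachable call (0 ≤ l < rp < n)
        let rv := (PySem.List.pyGet? cyc rp).getD 0
        let nrv := (PySem.List.pyGet? cyc (rp - 1)).getD 0
        let nlv := (PySem.List.pyGet? cyc (PySem.Int.mod (l + 1) n)).getD 0
        let o1 := (min lv nrv, max lv nrv)
        let o2 := (min rv nlv, max rv nlv)
        let res1 := if me.contains o1 then pvRec cyc me f l (rp - 1) (etp - 1) m else (false, m)
        if res1.1 then (true, res1.2.insert key true)
        else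
          let res2 := if me.contains o2 then pvRec cyc me f (l + 1) rp (etp - 1) res1.2 else (false, res1.2)
          (res2.1, res2.2.insert key res2.1)

def backtrack_missing_edges_iterative_py_alt (ordered_cycle : List Int) (missing_edges : List (Int × Int)) (edges_to_place : Int) : Bool :=
  (pvRec ordered_cycle missing_edges (ordered_cycle.length + 1) 1 (-1) edges_to_place PySem.Dict.empty).1

-- ===== PRECONDITION & SPEC =====
-- Pre_ excludes only the empty cycle, on which A raises ZeroDivisionError at `right_ptr % len(ordered_cycle)`.
def Pre_backtrack_missing_edges_iterative_py (ordered_cycle : List Int) (missing_edges : List (Int × Int)) (edges_to_place : Int) : Prop :=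
  ordered_cycle ≠ []
instance (ordered_cycle : List Int) (missing_edges : List (Int × Int)) (edges_to_place : Int) : Decidable (Pre_backtrack_missing_edges_iterative_py ordered_cycle missing_edges edges_to_place) := by unfold Pre_backtrack_missing_edges_iterative_py; infer_instance

def pvWitness_backtrack_missing_edges_iterative_py : List Int × (List (Int × Int)) × Int :=
  ([1, 2, 3], [(1, 2)], 1)

def Spec_backtrack_missing_edges_iterative_py (ordered_cycle : List Int) (missing_edges : List (Int × Int)) (edges_to_place : Int) (out : Bool) : Prop := out = backtrack_missing_edges_iterative_py_alt ordered_cycle missing_edges edges_to_place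
instance (ordered_cycle : List Int) (missing_edges : List (Int × Int)) (edges_to_place : Int) (out : Bool) : Decidable (Spec_backtrack_missing_edges_iterative_py ordered_cycle missing_edges edges_to_place out) := by unfold Spec_backtrack_missing_edges_iterative_py; infer_instance

-- ===== CLAIM (what is proved, stated in full; the proofs are below) =====
def Claim_equal_backtrack_missing_edges_iterative_py : Prop := ∀ (ordered_cycle : List Int) (missing_edges : List (Int × Int)) (edges_to_place : Int), Dom_backtrack_missing_edges_iterative_py ordered_cycle missing_edges edges_to_place → Pre_backtrack_missing_edges_iterative_py ordered_cycle missing_edges edges_to_place → Spec_backtrack_missing_edges_iterative_py ordered_cycle missing_edges edges_to_place (backtrack_missing_edges_iterative_py ordered_cycle missing_edges edges_to_place)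

-- ===== LEMMAS AND PROOFS =====

lemma pvLoopA_ret (cyc : List Int) (me : List (Int × Int)) {fr : PvFrame} {rest : List PvFrame}
    {m : PySem.Dict (Int × Int) Bool} {b : Bool} (f : Nat)
    (h : pvStep cyc me fr rest m = .inl b) :
    pvLoopA cyc me (f + 1) (fr :: rest) m = some b := by
  rw [pvLoopA, h]

lemma pvLoopA_cont (cyc : List Int) (me : List (Int × Int)) {fr : PvFrame} {rest s' : List PvFrame}
    {m m' : PySem.Dict (Int × Int) Bool} (f : Nat)
    (h : pvStep cyc me fr rest m = .inr (s', m')) :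
    pvLoopA cyc me (f + 1) (fr :: rest) m = pvLoopA cyc me f s' m' := by
  rw [pvLoopA, h]

lemma pvLoopA_mono (cyc : List Int) (me : List (Int × Int)) :
    ∀ (f : Nat) (s : List PvFrame) (m : PySem.Dict (Int × Int) Bool) (out : Bool),
      pvLoopA cyc me f s m = some out → pvLoopA cyc me (f + 1) s m = some out := by
  intro f
  induction f with
  | zero => intro s m out h; simp [pvLoopA] at h
  | succ f ih =>
    intro s m out h
    match s with
    | [] => simpa [pvLoopA] using h
    | fr :: rest =>
      rw [pvLoopA] at h
      rw [pvLoopA]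
      cases hs : pvStep cyc me fr rest m with
      | inl b => rw [hs] at h; simpa using h
      | inr p =>
        obtain ⟨s', m'⟩ := p
        simp only [hs] at h ⊢
        exact ih _ _ _ h

lemma pvLoopA_mono_le (cyc : List Int) (me : List (Int × Int)) {f f' : Nat} (hle : f ≤ f')
    {s : List PvFrame} {m : PySem.Dict (Int × Int) Bool} {out : Bool}
    (h : pvLoopA cyc me f s m = some out) : pvLoopA cyc me f' s m = some out := by
  induction hle with
  | refl => exact h
  | step _ ih => exact pvLoopA_mono cyc me _ _ _ _ ih

lemma pvMod_small {a n : Int} (h0 : 0 ≤ a) (h : a < n) : PySem.Int.mod a n = a := by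
  rw [PySem.Int.mod_eq_emod_of_pos (by omega)]; exact Int.emod_eq_of_lt h0 h

-- the two candidate edges, as B computes them
def pvO1 (cyc : List Int) (l rp : Int) : Int × Int :=
  (min ((PySem.List.pyGet? cyc l).getD 0) ((PySem.List.pyGet? cyc (rp - 1)).getD 0),
   max ((PySem.List.pyGet? cyc l).getD 0) ((PySem.List.pyGet? cyc (rp - 1)).getD 0))
def pvO2 (cyc : List Int) (l rp : Int) : Int × Int :=
  (min ((PySem.List.pyGet? cyc rp).getD 0) ((PySem.List.pyGet? cyc (PySem.Int.mod (l + 1) (cyc.length : Int))).getD 0),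
   max ((PySem.List.pyGet? cyc rp).getD 0) ((PySem.List.pyGet? cyc (PySem.Int.mod (l + 1) (cyc.length : Int))).getD 0))

lemma pvRec_memo (cyc : List Int) (me : List (Int × Int)) (f : Nat) (l r etp : Int)
    (m : PySem.Dict (Int × Int) Bool) {v : Bool}
    (h : m.get? (l, PySem.Int.mod r (cyc.length : Int)) = some v) :
    pvRec cyc me (f + 1) l r etp m = (v, m) := by
  simp [pvRec, h]

lemma pvRec_etp0 (cyc : List Int) (me : List (Int × Int)) (f : Nat) (l r etp : Int)
    (m : PySem.Dict (Int × Int) Bool)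
    (h : m.get? (l, PySem.Int.mod r (cyc.length : Int)) = none) (he : etp = 0) :
    pvRec cyc me (f + 1) l r etp m = (true, m) := by
  simp [pvRec, h, he]

lemma pvRec_ge (cyc : List Int) (me : List (Int × Int)) (f : Nat) (l r etp : Int)
    (m : PySem.Dict (Int × Int) Bool)
    (h : m.get? (l, PySem.Int.mod r (cyc.length : Int)) = none) (he : etp ≠ 0)
    (hge : l ≥ PySem.Int.mod r (cyc.length : Int)) :
    pvRec cyc me (f + 1) l r etp m = (false, m.insert (l, PySem.Int.mod r (cyc.length : Int)) false) := by
  simp [pvRec, h, he, hge]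

lemma pvRec_rec (cyc : List Int) (me : List (Int × Int)) (f : Nat) (l r etp : Int)
    (m : PySem.Dict (Int × Int) Bool)
    (h : m.get? (l, PySem.Int.mod r (cyc.length : Int)) = none) (he : etp ≠ 0)
    (hlt : ¬ l ≥ PySem.Int.mod r (cyc.length : Int)) :
    pvRec cyc me (f + 1) l r etp m =
      (let rp := PySem.Int.mod r (cyc.length : Int)
       let res1 := if me.contains (pvO1 cyc l rp) then pvRec cyc me f l (rp - 1) (etp - 1) m else (false, m)
       if res1.1 then (true, res1.2.insert (l, rp) true)
       else
         let res2 := if me.contains (pvO2 cyc l rp) then pvRec cyc me f (l + 1) rp (etp - 1) res1.2 else (false, res1.2)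
         (res2.1, res2.2.insert (l, rp) res2.1)) := by
  simp only [pvRec, h, he, hlt, pvO1, pvO2, if_false]
  rfl

-- pvStep outcome lemmas (the machine's one-iteration behaviour under explicit conditions)
lemma pvStep_etp0 (cyc : List Int) (me : List (Int × Int)) (fr : PvFrame) (rest : List PvFrame)
    (m : PySem.Dict (Int × Int) Bool)
    (h : m.get? (fr.left_ptr, PySem.Int.mod fr.right_ptr (cyc.length : Int)) = none)
    (he : fr.edges_to_place = 0) :
    pvStep cyc me fr rest m = .inl true := by
  simp [pvStep, h, he]

lemma pvStep_ge (cyc : List Int) (me : List (Int × Int)) (fr : PvFrame) (rest : List PvFrame)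
    (m : PySem.Dict (Int × Int) Bool)
    (h : m.get? (fr.left_ptr, PySem.Int.mod fr.right_ptr (cyc.length : Int)) = none)
    (he : fr.edges_to_place ≠ 0)
    (hge : fr.left_ptr ≥ PySem.Int.mod fr.right_ptr (cyc.length : Int)) :
    pvStep cyc me fr rest m
      = .inr (rest, m.insert (fr.left_ptr, PySem.Int.mod fr.right_ptr (cyc.length : Int)) false) := by
  simp [pvStep, h, he, hge]

-- a frame in state "new" steps exactly like the corresponding "options" frame with the computed options
lemma pvStep_new (cyc : List Int) (me : List (Int × Int)) (l r etp : Int) (rest : List PvFrame)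
    (m : PySem.Dict (Int × Int) Bool)
    (h : m.get? (l, PySem.Int.mod r (cyc.length : Int)) = none) (he : etp ≠ 0)
    (hlt : ¬ l ≥ PySem.Int.mod r (cyc.length : Int)) :
    pvStep cyc me ⟨l, r, etp, "new", [], 0⟩ rest m
      = pvStep cyc me ⟨l, r, etp, "options",
          pvOptionsList cyc me l (PySem.Int.mod r (cyc.length : Int)), 0⟩ rest m := by
  simp [pvStep, h, he, hlt]

lemma pvStep_opts_exhausted (cyc : List Int) (me : List (Int × Int)) (l r etp : Int)
    (opts : List (String × Int × Int)) (oi : Int) (rest : List PvFrame)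
    (m : PySem.Dict (Int × Int) Bool)
    (h : m.get? (l, PySem.Int.mod r (cyc.length : Int)) = none) (he : etp ≠ 0)
    (hlt : ¬ l ≥ PySem.Int.mod r (cyc.length : Int)) (hoi : oi ≥ (opts.length : Int)) :
    pvStep cyc me ⟨l, r, etp, "options", opts, oi⟩ rest m
      = .inr (rest, m.insert (l, PySem.Int.mod r (cyc.length : Int)) false) := by
  simp [pvStep, h, he, hlt, hoi]

lemma pvStep_opt_l2r (cyc : List Int) (me : List (Int × Int)) (l r etp : Int)
    (opts : List (String × Int × Int)) (oi : Int) (e : Int × Int) (rest : List PvFrame)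
    (m : PySem.Dict (Int × Int) Bool)
    (h : m.get? (l, PySem.Int.mod r (cyc.length : Int)) = none) (he : etp ≠ 0)
    (hlt : ¬ l ≥ PySem.Int.mod r (cyc.length : Int)) (hoi : ¬ oi ≥ (opts.length : Int))
    (hopt : (PySem.List.pyGet? opts oi).getD ("", 0, 0) = ("left_to_right", e)) :
    pvStep cyc me ⟨l, r, etp, "options", opts, oi⟩ rest m
      = (let nr := PySem.Int.mod (PySem.Int.mod r (cyc.length : Int) - 1) (cyc.length : Int)
         let frame2 : PvFrame := ⟨l, r, etp, "options", opts, oi + 1⟩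
         match m.get? (l, nr) with
         | some v =>
           if v = false then .inr (frame2 :: rest, m)
           else .inr (⟨l, nr, etp - 1, "new", [], 0⟩ :: frame2 :: rest, m)
         | none => .inr (⟨l, nr, etp - 1, "new", [], 0⟩ :: frame2 :: rest, m)) := by
  simp [pvStep, h, he, hlt, hoi, hopt]

lemma pvStep_opt_r2l (cyc : List Int) (me : List (Int × Int)) (l r etp : Int)
    (opts : List (String × Int × Int)) (oi : Int) (e : Int × Int) (rest : List PvFrame)
    (m : PySem.Dict (Int × Int) Bool)
    (h : m.get? (l, PySem.Int.mod r (cyc.length : Int)) = none) (he : etp ≠ 0)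
    (hlt : ¬ l ≥ PySem.Int.mod r (cyc.length : Int)) (hoi : ¬ oi ≥ (opts.length : Int))
    (hopt : (PySem.List.pyGet? opts oi).getD ("", 0, 0) = ("right_to_left", e)) :
    pvStep cyc me ⟨l, r, etp, "options", opts, oi⟩ rest m
      = (let nl := PySem.Int.mod (l + 1) (cyc.length : Int)
         let rp := PySem.Int.mod r (cyc.length : Int)
         let frame2 : PvFrame := ⟨l, r, etp, "options", opts, oi + 1⟩
         match m.get? (nl, rp) with
         | some v =>
           if v = false then .inr (frame2 :: rest, m)
           else .inr (⟨nl, rp, etp - 1, "new", [], 0⟩ :: frame2 :: rest, m)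
         | none => .inr (⟨nl, rp, etp - 1, "new", [], 0⟩ :: frame2 :: rest, m)) := by
  simp [pvStep, h, he, hlt, hoi, hopt]

-- pvRec, when it returns false, only adds `false` entries whose key-gap is at most the call's gap
lemma pvRec_writes (cyc : List Int) (me : List (Int × Int)) (hn : 0 < cyc.length) :
    ∀ (g : Nat) (l r etp : Int) (m : PySem.Dict (Int × Int) Bool), 0 ≤ l →
      (pvRec cyc me g l r etp m).1 = false →
      ∀ k : Int × Int, (pvRec cyc me g l r etp m).2.get? k = m.get? k ∨
        ((pvRec cyc me g l r etp m).2.get? k = some false ∧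
          k.2 - k.1 ≤ PySem.Int.mod r (cyc.length : Int) - l) := by
  intro g
  induction g with
  | zero =>
    intro l r etp m hl hf k
    simp [pvRec]
  | succ g ih =>
    intro l r etp m hl hf k
    have hnpos : (0 : Int) < (cyc.length : Int) := by exact_mod_cast hn
    have hrp0 : 0 ≤ PySem.Int.mod r (cyc.length : Int) := PySem.Int.mod_nonneg r hnpos
    have hrplt : PySem.Int.mod r (cyc.length : Int) < (cyc.length : Int) := PySem.Int.mod_lt r hnpos
    cases hm : m.get? (l, PySem.Int.mod r (cyc.length : Int)) with
    | some v =>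
      rw [pvRec_memo cyc me g l r etp m hm]
      exact Or.inl rfl
    | none =>
      by_cases he : etp = 0
      · rw [pvRec_etp0 cyc me g l r etp m hm he] at hf
        simp at hf
      · by_cases hge : l ≥ PySem.Int.mod r (cyc.length : Int)
        · rw [pvRec_ge cyc me g l r etp m hm he hge]
          by_cases hk : k = (l, PySem.Int.mod r (cyc.length : Int))
          · subst hk
            refine Or.inr ⟨PySem.Dict.get?_insert_self _ _ _, by simp⟩
          · exact Or.inl (PySem.Dict.get?_insert_of_ne _ _ hk)
        · have hlt : l < PySem.Int.mod r (cyc.length : Int) := by omega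
          have hrp1 : (0 : Int) ≤ PySem.Int.mod r (cyc.length : Int) - 1 := by omega
          have hmod1 : PySem.Int.mod (PySem.Int.mod r (cyc.length : Int) - 1) (cyc.length : Int)
              = PySem.Int.mod r (cyc.length : Int) - 1 := pvMod_small hrp1 (by omega)
          have hmod2 : PySem.Int.mod (PySem.Int.mod r (cyc.length : Int)) (cyc.length : Int)
              = PySem.Int.mod r (cyc.length : Int) := pvMod_small hrp0 hrplt
          rw [pvRec_rec cyc me g l r etp m hm he hge] at hf ⊢
          dsimp only at hf ⊢
          cases hres1 : (if me.contains (pvO1 cyc l (PySem.Int.mod r (cyc.length : Int)))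
              then pvRec cyc me g l (PySem.Int.mod r (cyc.length : Int) - 1) (etp - 1) m
              else (false, m)) with
          | mk b1 m1 =>
            rw [hres1] at hf
            cases b1 with
            | true => simp at hf
            | false =>
              dsimp only at hf ⊢
              cases hres2 : (if me.contains (pvO2 cyc l (PySem.Int.mod r (cyc.length : Int)))
                  then pvRec cyc me g (l + 1) (PySem.Int.mod r (cyc.length : Int)) (etp - 1) m1
                  else (false, m1)) with
              | mk b2 m2 =>
                rw [hres2] at hf
                dsimp only at hf ⊢
                subst hf
                simp only [Bool.false_eq_true, if_false]
                -- step 1 : m1 versus m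
                have h1 : m1.get? k = m.get? k ∨
                    (m1.get? k = some false ∧ k.2 - k.1 ≤ PySem.Int.mod r (cyc.length : Int) - 1 - l) := by
                  by_cases hc1 : me.contains (pvO1 cyc l (PySem.Int.mod r (cyc.length : Int)))
                  · rw [if_pos hc1] at hres1
                    have hb1 : (pvRec cyc me g l (PySem.Int.mod r (cyc.length : Int) - 1) (etp - 1) m).1 = false := by
                      rw [hres1]
                    have := ih l (PySem.Int.mod r (cyc.length : Int) - 1) (etp - 1) m hl hb1 k
                    rw [hres1] at this
                    rwa [hmod1] at this
                  · rw [if_neg hc1] at hres1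
                    have hmm := congrArg Prod.snd hres1
                    dsimp at hmm
                    rw [← hmm]
                    exact Or.inl rfl
                -- step 2 : m2 versus m1
                have h2 : m2.get? k = m1.get? k ∨
                    (m2.get? k = some false ∧ k.2 - k.1 ≤ PySem.Int.mod r (cyc.length : Int) - (l + 1)) := by
                  by_cases hc2 : me.contains (pvO2 cyc l (PySem.Int.mod r (cyc.length : Int)))
                  · rw [if_pos hc2] at hres2
                    have hb2 : (pvRec cyc me g (l + 1) (PySem.Int.mod r (cyc.length : Int)) (etp - 1) m1).1 = false := by
                      rw [hres2]
                    have := ih (l + 1) (PySem.Int.mod r (cyc.length : Int)) (etp - 1) m1 (by omega) hb2 k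
                    rw [hres2] at this
                    rwa [hmod2] at this
                  · rw [if_neg hc2] at hres2
                    have hmm := congrArg Prod.snd hres2
                    dsimp at hmm
                    rw [← hmm]
                    exact Or.inl rfl
                by_cases hk : k = (l, PySem.Int.mod r (cyc.length : Int))
                · subst hk
                  refine Or.inr ⟨PySem.Dict.get?_insert_self _ _ _, by simp⟩
                · rw [PySem.Dict.get?_insert_of_ne _ _ hk]
                  rcases h2 with h2 | ⟨h2, hb⟩
                  · rw [h2]
                    rcases h1 with h1 | ⟨h1, hb1⟩
                    · exact Or.inl h1
                    · exact Or.inr ⟨h1, by omega⟩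
                  · exact Or.inr ⟨h2, by omega⟩

-- consequences of pvRec_writes used while stepping the machine
lemma pvRec_preserve (cyc : List Int) (me : List (Int × Int)) (hn : 0 < cyc.length)
    {g : Nat} {l r etp : Int} {m : PySem.Dict (Int × Int) Bool} (hl : 0 ≤ l)
    (hf : (pvRec cyc me g l r etp m).1 = false)
    (hAF : ∀ k : Int × Int, m.get? k ≠ some true) :
    (∀ k : Int × Int, (pvRec cyc me g l r etp m).2.get? k ≠ some true) ∧
    (∀ k : Int × Int, PySem.Int.mod r (cyc.length : Int) - l < k.2 - k.1 →
      (pvRec cyc me g l r etp m).2.get? k = m.get? k) := by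
  constructor
  · intro k hk
    rcases pvRec_writes cyc me hn g l r etp m hl hf k with h | ⟨h, _⟩
    · exact hAF k (h ▸ hk)
    · rw [h] at hk; simp at hk
  · intro k hk
    rcases pvRec_writes cyc me hn g l r etp m hl hf k with h | ⟨_, hb⟩
    · exact h
    · omega

-- processing A's parent frame after its first (left_to_right) option has been fully explored,
-- matching B's second conjunct; `ih` is the simulation hypothesis at measure g
lemma pvSimFrame2 (cyc : List Int) (me : List (Int × Int)) (hn : 0 < cyc.length)
    (g : Nat) (l r etp : Int) (m1 : PySem.Dict (Int × Int) Bool) (rest : List PvFrame) (fl : Nat)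
    (ih : ∀ (l' r' etp' : Int) (m' : PySem.Dict (Int × Int) Bool) (rest' : List PvFrame) (fl' : Nat),
      0 ≤ l' → (PySem.Int.mod r' (cyc.length : Int) - l').toNat ≤ g →
      m'.get? (l', PySem.Int.mod r' (cyc.length : Int)) = none →
      (∀ k : Int × Int, m'.get? k ≠ some true) →
      (if (pvRec cyc me (g + 1) l' r' etp' m').1 then
        pvLoopA cyc me (pvFuelA g + fl') (⟨l', r', etp', "new", [], 0⟩ :: rest') m' = some true
      else ∀ out : Bool, pvLoopA cyc me fl' rest' (pvRec cyc me (g + 1) l' r' etp' m').2 = some out →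
        pvLoopA cyc me (pvFuelA g + fl') (⟨l', r', etp', "new", [], 0⟩ :: rest') m' = some out))
    (hl : 0 ≤ l) (he : etp ≠ 0) (hlt : l < PySem.Int.mod r (cyc.length : Int))
    (hg : (PySem.Int.mod r (cyc.length : Int) - (l + 1)).toNat ≤ g)
    (hc1 : me.contains (pvO1 cyc l (PySem.Int.mod r (cyc.length : Int))) = true)
    (hm1 : m1.get? (l, PySem.Int.mod r (cyc.length : Int)) = none)
    (hAF1 : ∀ k : Int × Int, m1.get? k ≠ some true) :
    (if (if me.contains (pvO2 cyc l (PySem.Int.mod r (cyc.length : Int)))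
        then pvRec cyc me (g + 1) (l + 1) (PySem.Int.mod r (cyc.length : Int)) (etp - 1) m1
        else (false, m1)).1 then
       pvLoopA cyc me (pvFuelA g + 3 + fl)
         (⟨l, r, etp, "options", pvOptionsList cyc me l (PySem.Int.mod r (cyc.length : Int)), 1⟩ :: rest) m1
         = some true
     else ∀ out : Bool,
       pvLoopA cyc me fl rest
           ((if me.contains (pvO2 cyc l (PySem.Int.mod r (cyc.length : Int)))
        then pvRec cyc me (g + 1) (l + 1) (PySem.Int.mod r (cyc.length : Int)) (etp - 1) m1
        else (false, m1)).2.insert (l, PySem.Int.mod r (cyc.length : Int)) false) = some out →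
       pvLoopA cyc me (pvFuelA g + 3 + fl)
         (⟨l, r, etp, "options", pvOptionsList cyc me l (PySem.Int.mod r (cyc.length : Int)), 1⟩ :: rest) m1
         = some out) := by
  have hnpos : (0 : Int) < (cyc.length : Int) := by exact_mod_cast hn
  have hrp0 : 0 ≤ PySem.Int.mod r (cyc.length : Int) := PySem.Int.mod_nonneg r hnpos
  have hrplt : PySem.Int.mod r (cyc.length : Int) < (cyc.length : Int) := PySem.Int.mod_lt r hnpos
  have hge : ¬ l ≥ PySem.Int.mod r (cyc.length : Int) := by omega
  have hmod1 : PySem.Int.mod (PySem.Int.mod r (cyc.length : Int) - 1) (cyc.length : Int)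
      = PySem.Int.mod r (cyc.length : Int) - 1 := pvMod_small (by omega) (by omega)
  have hmod2 : PySem.Int.mod (PySem.Int.mod r (cyc.length : Int)) (cyc.length : Int)
      = PySem.Int.mod r (cyc.length : Int) := pvMod_small hrp0 hrplt
  have hmodl : PySem.Int.mod (l + 1) (cyc.length : Int) = l + 1 := pvMod_small (by omega) (by omega)
  have hopts : pvOptionsList cyc me l (PySem.Int.mod r (cyc.length : Int))
      = ("left_to_right", (pvO1 cyc l (PySem.Int.mod r (cyc.length : Int))).1,
          (pvO1 cyc l (PySem.Int.mod r (cyc.length : Int))).2)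
        :: (if me.contains (pvO2 cyc l (PySem.Int.mod r (cyc.length : Int)))
            then [("right_to_left", (pvO2 cyc l (PySem.Int.mod r (cyc.length : Int))).1,
              (pvO2 cyc l (PySem.Int.mod r (cyc.length : Int))).2)] else []) := by
    have hc1' := hc1
    simp only [pvO1] at hc1'
    simp only [pvOptionsList, pvO1, pvO2, hmod1, hc1', if_true, List.singleton_append]
  by_cases hc2 : me.contains (pvO2 cyc l (PySem.Int.mod r (cyc.length : Int))) = true
  · -- second option exists
    have hoi1 : ¬ (1 : Int) ≥ ((pvOptionsList cyc me l (PySem.Int.mod r (cyc.length : Int))).length : Int) := by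
      rw [hopts, if_pos hc2]; simp
    have hopt1 : (PySem.List.pyGet? (pvOptionsList cyc me l (PySem.Int.mod r (cyc.length : Int))) 1).getD ("", 0, 0)
        = ("right_to_left", (pvO2 cyc l (PySem.Int.mod r (cyc.length : Int))).1,
            (pvO2 cyc l (PySem.Int.mod r (cyc.length : Int))).2) := by
      rw [hopts, if_pos hc2]; simp [PySem.List.pyGet?, PySem.List.pyIdx?]
    rw [if_pos hc2]
    rcases hch2 : m1.get? (l + 1, PySem.Int.mod r (cyc.length : Int)) with _ | v
    · -- second child not memoized: recurse via ih
      have hm' : m1.get? (l + 1, PySem.Int.mod (PySem.Int.mod r (cyc.length : Int)) (cyc.length : Int)) = none := by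
        rw [hmod2]; exact hch2
      have hgap : (PySem.Int.mod (PySem.Int.mod r (cyc.length : Int)) (cyc.length : Int) - (l + 1)).toNat ≤ g := by
        rw [hmod2]; omega
      have IH2 := ih (l + 1) (PySem.Int.mod r (cyc.length : Int)) (etp - 1) m1
        (⟨l, r, etp, "options", pvOptionsList cyc me l (PySem.Int.mod r (cyc.length : Int)), 2⟩ :: rest)
        (2 + fl) (by omega) hgap hm' hAF1
      have hstep2 : pvStep cyc me
          ⟨l, r, etp, "options", pvOptionsList cyc me l (PySem.Int.mod r (cyc.length : Int)), 1⟩ rest m1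
          = .inr (⟨l + 1, PySem.Int.mod r (cyc.length : Int), etp - 1, "new", [], 0⟩ ::
              ⟨l, r, etp, "options", pvOptionsList cyc me l (PySem.Int.mod r (cyc.length : Int)), 2⟩ :: rest, m1) := by
        rw [pvStep_opt_r2l cyc me l r etp _ 1 _ rest m1 hm1 he hge hoi1 hopt1]
        dsimp only
        rw [hmodl, hch2]
        all_goals simp
      cases hres2 : pvRec cyc me (g + 1) (l + 1) (PySem.Int.mod r (cyc.length : Int)) (etp - 1) m1 with
      | mk b2 m2 =>
        rw [hres2] at IH2
        cases b2 with
        | true =>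
          dsimp only at IH2 ⊢; simp only [reduceIte] at IH2 ⊢
          rw [show pvFuelA g + 3 + fl = (pvFuelA g + (2 + fl)) + 1 from by omega]
          rw [pvLoopA_cont cyc me _ hstep2]
          exact IH2
        | false =>
          dsimp only at IH2 ⊢; simp only [Bool.false_eq_true, reduceIte] at IH2 ⊢
          intro out hout
          rw [show pvFuelA g + 3 + fl = (pvFuelA g + (2 + fl)) + 1 from by omega]
          rw [pvLoopA_cont cyc me _ hstep2]
          apply IH2
          -- remaining: the parent frame, options exhausted, with memo m2
          have hb2 : (pvRec cyc me (g + 1) (l + 1) (PySem.Int.mod r (cyc.length : Int)) (etp - 1) m1).1 = false := by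
            rw [hres2]
          have hpres := pvRec_preserve cyc me hn (by omega : (0:Int) ≤ l + 1) hb2 hAF1
          rw [hres2] at hpres
          have hm2 : m2.get? (l, PySem.Int.mod r (cyc.length : Int)) = none := by
            have := hpres.2 (l, PySem.Int.mod r (cyc.length : Int)) (by rw [hmod2]; dsimp only; omega)
            rw [this]; exact hm1
          have hoi2 : (2 : Int) ≥ ((pvOptionsList cyc me l (PySem.Int.mod r (cyc.length : Int))).length : Int) := by
            rw [hopts, if_pos hc2]; simp
          have hstep3 : pvStep cyc me
              ⟨l, r, etp, "options", pvOptionsList cyc me l (PySem.Int.mod r (cyc.length : Int)), 2⟩ rest m2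
              = .inr (rest, m2.insert (l, PySem.Int.mod r (cyc.length : Int)) false) :=
            pvStep_opts_exhausted cyc me l r etp _ 2 rest m2 hm2 he hge hoi2
          rw [show (2 + fl : Nat) = (1 + fl) + 1 from by omega]
          rw [pvLoopA_cont cyc me _ hstep3]
          exact pvLoopA_mono_le cyc me (by omega) hout
    · -- second child memoized: it is a `false` entry; A skips the push, B returns it from the memo
      have hv : v = false := by
        cases v
        · rfl
        · exact absurd hch2 (hAF1 _)
      subst hv
      have hrec2 : pvRec cyc me (g + 1) (l + 1) (PySem.Int.mod r (cyc.length : Int)) (etp - 1) m1 = (false, m1) := by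
        rw [pvRec_memo cyc me g (l + 1) (PySem.Int.mod r (cyc.length : Int)) (etp - 1) m1 (by rw [hmod2]; exact hch2)]
      rw [hrec2]
      dsimp only; simp only [Bool.false_eq_true, reduceIte]
      intro out hout
      have hstep2 : pvStep cyc me
          ⟨l, r, etp, "options", pvOptionsList cyc me l (PySem.Int.mod r (cyc.length : Int)), 1⟩ rest m1
          = .inr (⟨l, r, etp, "options", pvOptionsList cyc me l (PySem.Int.mod r (cyc.length : Int)), 2⟩ :: rest, m1) := by
        rw [pvStep_opt_r2l cyc me l r etp _ 1 _ rest m1 hm1 he hge hoi1 hopt1]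
        dsimp only
        rw [hmodl, hch2]
        all_goals simp
      have hoi2 : (2 : Int) ≥ ((pvOptionsList cyc me l (PySem.Int.mod r (cyc.length : Int))).length : Int) := by
        rw [hopts, if_pos hc2]; simp
      have hstep3 : pvStep cyc me
          ⟨l, r, etp, "options", pvOptionsList cyc me l (PySem.Int.mod r (cyc.length : Int)), 2⟩ rest m1
          = .inr (rest, m1.insert (l, PySem.Int.mod r (cyc.length : Int)) false) :=
        pvStep_opts_exhausted cyc me l r etp _ 2 rest m1 hm1 he hge hoi2
      rw [show pvFuelA g + 3 + fl = ((pvFuelA g + 1 + fl) + 1) + 1 from by omega]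
      rw [pvLoopA_cont cyc me _ hstep2, pvLoopA_cont cyc me _ hstep3]
      exact pvLoopA_mono_le cyc me (by omega) hout
  · -- no second option: options exhausted at index 1
    have hc2' : me.contains (pvO2 cyc l (PySem.Int.mod r (cyc.length : Int))) = false := by
      simpa using hc2
    rw [if_neg hc2]
    dsimp only; simp only [Bool.false_eq_true, reduceIte]
    intro out hout
    have hoi1 : (1 : Int) ≥ ((pvOptionsList cyc me l (PySem.Int.mod r (cyc.length : Int))).length : Int) := by
      rw [hopts, if_neg hc2]; simp
    have hstep2 : pvStep cyc me
        ⟨l, r, etp, "options", pvOptionsList cyc me l (PySem.Int.mod r (cyc.length : Int)), 1⟩ rest m1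
        = .inr (rest, m1.insert (l, PySem.Int.mod r (cyc.length : Int)) false) :=
      pvStep_opts_exhausted cyc me l r etp _ 1 rest m1 hm1 he hge hoi1
    rw [show pvFuelA g + 3 + fl = (pvFuelA g + 2 + fl) + 1 from by omega]
    rw [pvLoopA_cont cyc me _ hstep2]
    exact pvLoopA_mono_le cyc me (by omega) hout

-- main simulation: one fresh frame of A's machine behaves exactly like one call of B's rec
lemma pvSim (cyc : List Int) (me : List (Int × Int)) (hn : 0 < cyc.length) :
    ∀ (g : Nat) (l r etp : Int) (m : PySem.Dict (Int × Int) Bool)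
      (rest : List PvFrame) (fl : Nat),
      0 ≤ l →
      (PySem.Int.mod r (cyc.length : Int) - l).toNat ≤ g →
      m.get? (l, PySem.Int.mod r (cyc.length : Int)) = none →
      (∀ k : Int × Int, m.get? k ≠ some true) →
      (if (pvRec cyc me (g + 1) l r etp m).1 then
        pvLoopA cyc me (pvFuelA g + fl) (⟨l, r, etp, "new", [], 0⟩ :: rest) m = some true
      else ∀ out : Bool, pvLoopA cyc me fl rest (pvRec cyc me (g + 1) l r etp m).2 = some out →
        pvLoopA cyc me (pvFuelA g + fl) (⟨l, r, etp, "new", [], 0⟩ :: rest) m = some out) := by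
  intro g
  induction g with
  | zero =>
    intro l r etp m rest fl hl hg hm hAF
    by_cases he : etp = 0
    · rw [pvRec_etp0 cyc me 0 l r etp m hm he]
      dsimp only
      simp only [reduceIte]
      rw [show pvFuelA 0 + fl = (3 + fl) + 1 from by simp [pvFuelA]; omega]
      exact pvLoopA_ret cyc me _ (pvStep_etp0 cyc me _ rest m hm he)
    · have hge : l ≥ PySem.Int.mod r (cyc.length : Int) := by omega
      rw [pvRec_ge cyc me 0 l r etp m hm he hge]
      dsimp only
      simp only [Bool.false_eq_true, reduceIte]
      intro out hout
      rw [show pvFuelA 0 + fl = (3 + fl) + 1 from by simp [pvFuelA]; omega]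
      rw [pvLoopA_cont cyc me _ (pvStep_ge cyc me _ rest m hm he hge)]
      exact pvLoopA_mono_le cyc me (by omega) hout
  | succ g ih =>
    intro l r etp m rest fl hl hg hm hAF
    have hnpos : (0 : Int) < (cyc.length : Int) := by exact_mod_cast hn
    have hrp0 : 0 ≤ PySem.Int.mod r (cyc.length : Int) := PySem.Int.mod_nonneg r hnpos
    have hrplt : PySem.Int.mod r (cyc.length : Int) < (cyc.length : Int) := PySem.Int.mod_lt r hnpos
    by_cases he : etp = 0
    · rw [pvRec_etp0 cyc me (g + 1) l r etp m hm he]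
      dsimp only
      simp only [reduceIte]
      rw [show pvFuelA (g + 1) + fl = (2 * pvFuelA g + 3 + fl) + 1 from by simp [pvFuelA]; omega]
      exact pvLoopA_ret cyc me _ (pvStep_etp0 cyc me _ rest m hm he)
    · by_cases hge : l ≥ PySem.Int.mod r (cyc.length : Int)
      · rw [pvRec_ge cyc me (g + 1) l r etp m hm he hge]
        dsimp only
        simp only [Bool.false_eq_true, reduceIte]
        intro out hout
        rw [show pvFuelA (g + 1) + fl = (2 * pvFuelA g + 3 + fl) + 1 from by simp [pvFuelA]; omega]
        rw [pvLoopA_cont cyc me _ (pvStep_ge cyc me _ rest m hm he hge)]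
        exact pvLoopA_mono_le cyc me (by omega) hout
      · have hlt : l < PySem.Int.mod r (cyc.length : Int) := by omega
        have hmod1 : PySem.Int.mod (PySem.Int.mod r (cyc.length : Int) - 1) (cyc.length : Int) = PySem.Int.mod r (cyc.length : Int) - 1 :=
          pvMod_small (by omega) (by omega)
        have hmod2 : PySem.Int.mod (PySem.Int.mod r (cyc.length : Int)) (cyc.length : Int) = PySem.Int.mod r (cyc.length : Int) := pvMod_small hrp0 hrplt
        have hmodl : PySem.Int.mod (l + 1) (cyc.length : Int) = l + 1 := pvMod_small (by omega) (by omega)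
        have hopts : pvOptionsList cyc me l (PySem.Int.mod r (cyc.length : Int))
            = (if me.contains (pvO1 cyc l (PySem.Int.mod r (cyc.length : Int))) then
                [("left_to_right", (pvO1 cyc l (PySem.Int.mod r (cyc.length : Int))).1, (pvO1 cyc l (PySem.Int.mod r (cyc.length : Int))).2)] else [])
              ++ (if me.contains (pvO2 cyc l (PySem.Int.mod r (cyc.length : Int))) then
                [("right_to_left", (pvO2 cyc l (PySem.Int.mod r (cyc.length : Int))).1, (pvO2 cyc l (PySem.Int.mod r (cyc.length : Int))).2)] else []) := by
          simp only [pvOptionsList, pvO1, pvO2, hmod1]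
        rw [pvRec_rec cyc me (g + 1) l r etp m hm he hge]
        dsimp only
        by_cases hc1 : me.contains (pvO1 cyc l (PySem.Int.mod r (cyc.length : Int))) = true
        · simp only [hc1, reduceIte]
          have hoi0 : ¬ (0 : Int) ≥ ((pvOptionsList cyc me l (PySem.Int.mod r (cyc.length : Int))).length : Int) := by
            rw [hopts, if_pos hc1]
            simp
          have hopt0 : (PySem.List.pyGet? (pvOptionsList cyc me l (PySem.Int.mod r (cyc.length : Int))) 0).getD ("", 0, 0)
              = ("left_to_right", (pvO1 cyc l (PySem.Int.mod r (cyc.length : Int))).1, (pvO1 cyc l (PySem.Int.mod r (cyc.length : Int))).2) := by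
            rw [hopts, if_pos hc1]
            simp [PySem.List.pyGet?, PySem.List.pyIdx?]
          rcases hch1 : m.get? (l, PySem.Int.mod r (cyc.length : Int) - 1) with _ | v
          · -- first child fresh: recurse via ih on it
            have hm' : m.get? (l, PySem.Int.mod (PySem.Int.mod r (cyc.length : Int) - 1) (cyc.length : Int)) = none := by
              rw [hmod1]; exact hch1
            have hgap : (PySem.Int.mod (PySem.Int.mod r (cyc.length : Int) - 1) (cyc.length : Int) - l).toNat ≤ g := by
              rw [hmod1]; omega
            have IH1 := ih l (PySem.Int.mod r (cyc.length : Int) - 1) (etp - 1) m (⟨l, r, etp, "options", pvOptionsList cyc me l (PySem.Int.mod r (cyc.length : Int)), 1⟩ :: rest) (pvFuelA g + 3 + fl) hl hgap hm' hAF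
            have hstep1 : pvStep cyc me ⟨l, r, etp, "new", [], 0⟩ rest m
                = .inr (⟨l, PySem.Int.mod r (cyc.length : Int) - 1, etp - 1, "new", [], 0⟩ :: ⟨l, r, etp, "options", pvOptionsList cyc me l (PySem.Int.mod r (cyc.length : Int)), 1⟩ :: rest, m) := by
              rw [pvStep_new cyc me l r etp rest m hm he hge,
                  pvStep_opt_l2r cyc me l r etp _ 0 _ rest m hm he hge hoi0 hopt0]
              dsimp only
              rw [hmod1, hch1]
              all_goals simp
            rw [show pvFuelA (g + 1) + fl = (pvFuelA g + (pvFuelA g + 3 + fl)) + 1 from by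
              simp [pvFuelA]; omega]
            rw [pvLoopA_cont cyc me _ hstep1]
            cases hres1 : pvRec cyc me (g + 1) l (PySem.Int.mod r (cyc.length : Int) - 1) (etp - 1) m with
            | mk b1 m1 =>
              rw [hres1] at IH1
              cases b1 with
              | true =>
                try dsimp only at IH1
                try dsimp only
                try simp only [reduceIte] at IH1
                try simp only [reduceIte]
                exact IH1
              | false =>
                try dsimp only at IH1
                try dsimp only
                try simp only [Bool.false_eq_true, reduceIte] at IH1
                try simp only [Bool.false_eq_true, reduceIte]
                have hb1 : (pvRec cyc me (g + 1) l (PySem.Int.mod r (cyc.length : Int) - 1) (etp - 1) m).1 = false := by rw [hres1]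
                have hpres := pvRec_preserve cyc me hn hl hb1 hAF
                rw [hres1] at hpres
                have hAF1 : ∀ k : Int × Int, m1.get? k ≠ some true := hpres.1
                have hm1 : m1.get? (l, PySem.Int.mod r (cyc.length : Int)) = none := by
                  have := hpres.2 (l, PySem.Int.mod r (cyc.length : Int)) (by rw [hmod1]; dsimp only; omega)
                  rw [this]; exact hm
                have HF2 := pvSimFrame2 cyc me hn g l r etp m1 rest fl ih hl he hlt (by omega) hc1 hm1 hAF1
                by_cases hc2 : me.contains (pvO2 cyc l (PySem.Int.mod r (cyc.length : Int))) = true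
                · simp only [hc2, reduceIte] at HF2 ⊢
                  cases hres2 : pvRec cyc me (g + 1) (l + 1) (PySem.Int.mod r (cyc.length : Int)) (etp - 1) m1 with
                  | mk b2 m2 =>
                    rw [hres2] at HF2
                    cases b2 with
                    | true =>
                      try dsimp only at HF2
                      try dsimp only
                      try simp only [reduceIte] at HF2
                      try simp only [reduceIte]
                      exact IH1 true HF2
                    | false =>
                      try dsimp only at HF2
                      try dsimp only
                      try simp only [Bool.false_eq_true, reduceIte] at HF2
                      try simp only [Bool.false_eq_true, reduceIte]
                      intro out hout
                      exact IH1 out (HF2 out hout)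
                · have hc2' : me.contains (pvO2 cyc l (PySem.Int.mod r (cyc.length : Int))) = false := by simpa using hc2
                  simp only [hc2', Bool.false_eq_true, reduceIte] at HF2 ⊢
                  intro out hout
                  exact IH1 out (HF2 out hout)
          · -- first child memoized (necessarily false)
            have hv : v = false := by
              cases v
              · rfl
              · exact absurd hch1 (hAF _)
            subst hv
            have hrec1 : pvRec cyc me (g + 1) l (PySem.Int.mod r (cyc.length : Int) - 1) (etp - 1) m = (false, m) :=
              pvRec_memo cyc me g l (PySem.Int.mod r (cyc.length : Int) - 1) (etp - 1) m (by rw [hmod1]; exact hch1)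
            rw [hrec1]
            have hstep1 : pvStep cyc me ⟨l, r, etp, "new", [], 0⟩ rest m = .inr (⟨l, r, etp, "options", pvOptionsList cyc me l (PySem.Int.mod r (cyc.length : Int)), 1⟩ :: rest, m) := by
              rw [pvStep_new cyc me l r etp rest m hm he hge,
                  pvStep_opt_l2r cyc me l r etp _ 0 _ rest m hm he hge hoi0 hopt0]
              dsimp only
              rw [hmod1, hch1]
              all_goals simp
            have HF2 := pvSimFrame2 cyc me hn g l r etp m rest fl ih hl he hlt (by omega) hc1 hm hAF
            rw [show pvFuelA (g + 1) + fl = (2 * pvFuelA g + 3 + fl) + 1 from by simp [pvFuelA]; omega]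
            rw [pvLoopA_cont cyc me _ hstep1]
            by_cases hc2 : me.contains (pvO2 cyc l (PySem.Int.mod r (cyc.length : Int))) = true
            · simp only [hc2, reduceIte] at HF2 ⊢
              cases hres2 : pvRec cyc me (g + 1) (l + 1) (PySem.Int.mod r (cyc.length : Int)) (etp - 1) m with
              | mk b2 m2 =>
                rw [hres2] at HF2
                cases b2 with
                | true =>
                  try dsimp only at HF2
                  try dsimp only
                  try simp only [reduceIte] at HF2
                  try simp only [reduceIte]
                  exact pvLoopA_mono_le cyc me (by omega) HF2
                | false =>
                  try dsimp only at HF2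
                  try dsimp only
                  try simp only [Bool.false_eq_true, reduceIte] at HF2
                  try simp only [Bool.false_eq_true, reduceIte]
                  intro out hout
                  exact pvLoopA_mono_le cyc me (by omega) (HF2 out hout)
            · have hc2' : me.contains (pvO2 cyc l (PySem.Int.mod r (cyc.length : Int))) = false := by simpa using hc2
              simp only [hc2', Bool.false_eq_true, reduceIte] at HF2 ⊢
              intro out hout
              exact pvLoopA_mono_le cyc me (by omega) (HF2 out hout)
        · have hc1' : me.contains (pvO1 cyc l (PySem.Int.mod r (cyc.length : Int))) = false := by
            simpa using hc1
          simp only [hc1', Bool.false_eq_true, reduceIte]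
          by_cases hc2 : me.contains (pvO2 cyc l (PySem.Int.mod r (cyc.length : Int))) = true
          · -- only the right_to_left option
            have hoi0 : ¬ (0 : Int) ≥ ((pvOptionsList cyc me l (PySem.Int.mod r (cyc.length : Int))).length : Int) := by
              rw [hopts, if_neg hc1, if_pos hc2]
              simp
            have hopt0 : (PySem.List.pyGet? (pvOptionsList cyc me l (PySem.Int.mod r (cyc.length : Int))) 0).getD ("", 0, 0)
                = ("right_to_left", (pvO2 cyc l (PySem.Int.mod r (cyc.length : Int))).1, (pvO2 cyc l (PySem.Int.mod r (cyc.length : Int))).2) := by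
              rw [hopts, if_neg hc1, if_pos hc2]
              simp [PySem.List.pyGet?, PySem.List.pyIdx?]
            have hoi1 : (1 : Int) ≥ ((pvOptionsList cyc me l (PySem.Int.mod r (cyc.length : Int))).length : Int) := by
              rw [hopts, if_neg hc1, if_pos hc2]
              simp
            simp only [hc2, reduceIte]
            rcases hch2 : m.get? (l + 1, PySem.Int.mod r (cyc.length : Int)) with _ | v
            · have hm' : m.get? (l + 1, PySem.Int.mod (PySem.Int.mod r (cyc.length : Int)) (cyc.length : Int)) = none := by
                rw [hmod2]; exact hch2
              have hgap : (PySem.Int.mod (PySem.Int.mod r (cyc.length : Int)) (cyc.length : Int) - (l + 1)).toNat ≤ g := by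
                rw [hmod2]; omega
              have IH2 := ih (l + 1) (PySem.Int.mod r (cyc.length : Int)) (etp - 1) m (⟨l, r, etp, "options", pvOptionsList cyc me l (PySem.Int.mod r (cyc.length : Int)), 1⟩ :: rest) (pvFuelA g + 3 + fl) (by omega) hgap hm' hAF
              have hstep1 : pvStep cyc me ⟨l, r, etp, "new", [], 0⟩ rest m
                  = .inr (⟨l + 1, PySem.Int.mod r (cyc.length : Int), etp - 1, "new", [], 0⟩ :: ⟨l, r, etp, "options", pvOptionsList cyc me l (PySem.Int.mod r (cyc.length : Int)), 1⟩ :: rest, m) := by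
                rw [pvStep_new cyc me l r etp rest m hm he hge,
                    pvStep_opt_r2l cyc me l r etp _ 0 _ rest m hm he hge hoi0 hopt0]
                dsimp only
                rw [hmodl, hch2]
                all_goals simp
              rw [show pvFuelA (g + 1) + fl = (pvFuelA g + (pvFuelA g + 3 + fl)) + 1 from by
                simp [pvFuelA]; omega]
              rw [pvLoopA_cont cyc me _ hstep1]
              cases hres2 : pvRec cyc me (g + 1) (l + 1) (PySem.Int.mod r (cyc.length : Int)) (etp - 1) m with
              | mk b2 m2 =>
                rw [hres2] at IH2
                cases b2 with
                | true =>
                  try dsimp only at IH2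
                  try dsimp only
                  try simp only [reduceIte] at IH2
                  try simp only [reduceIte]
                  exact IH2
                | false =>
                  try dsimp only at IH2
                  try dsimp only
                  try simp only [Bool.false_eq_true, reduceIte] at IH2
                  try simp only [Bool.false_eq_true, reduceIte]
                  intro out hout
                  apply IH2
                  have hb2 : (pvRec cyc me (g + 1) (l + 1) (PySem.Int.mod r (cyc.length : Int)) (etp - 1) m).1 = false := by rw [hres2]
                  have hpres := pvRec_preserve cyc me hn (by omega : (0 : Int) ≤ l + 1) hb2 hAF
                  rw [hres2] at hpres
                  have hm2 : m2.get? (l, PySem.Int.mod r (cyc.length : Int)) = none := by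
                    have := hpres.2 (l, PySem.Int.mod r (cyc.length : Int)) (by rw [hmod2]; dsimp only; omega)
                    rw [this]; exact hm
                  have hstep2 : pvStep cyc me ⟨l, r, etp, "options", pvOptionsList cyc me l (PySem.Int.mod r (cyc.length : Int)), 1⟩ rest m2
                      = .inr (rest, m2.insert (l, PySem.Int.mod r (cyc.length : Int)) false) :=
                    pvStep_opts_exhausted cyc me l r etp _ 1 rest m2 hm2 he hge hoi1
                  rw [show pvFuelA g + 3 + fl = (pvFuelA g + 2 + fl) + 1 from by omega]
                  rw [pvLoopA_cont cyc me _ hstep2]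
                  exact pvLoopA_mono_le cyc me (by omega) hout
            · have hv : v = false := by
                cases v
                · rfl
                · exact absurd hch2 (hAF _)
              subst hv
              have hrec2 : pvRec cyc me (g + 1) (l + 1) (PySem.Int.mod r (cyc.length : Int)) (etp - 1) m = (false, m) :=
                pvRec_memo cyc me g (l + 1) (PySem.Int.mod r (cyc.length : Int)) (etp - 1) m (by rw [hmod2]; exact hch2)
              rw [hrec2]
              dsimp only
              simp only [Bool.false_eq_true, reduceIte]
              intro out hout
              have hstep1 : pvStep cyc me ⟨l, r, etp, "new", [], 0⟩ rest m = .inr (⟨l, r, etp, "options", pvOptionsList cyc me l (PySem.Int.mod r (cyc.length : Int)), 1⟩ :: rest, m) := by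
                rw [pvStep_new cyc me l r etp rest m hm he hge,
                    pvStep_opt_r2l cyc me l r etp _ 0 _ rest m hm he hge hoi0 hopt0]
                dsimp only
                rw [hmodl, hch2]
                all_goals simp
              have hstep2 : pvStep cyc me ⟨l, r, etp, "options", pvOptionsList cyc me l (PySem.Int.mod r (cyc.length : Int)), 1⟩ rest m
                  = .inr (rest, m.insert (l, PySem.Int.mod r (cyc.length : Int)) false) :=
                pvStep_opts_exhausted cyc me l r etp _ 1 rest m hm he hge hoi1
              rw [show pvFuelA (g + 1) + fl = ((2 * pvFuelA g + 2 + fl) + 1) + 1 from by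
                simp [pvFuelA]; omega]
              rw [pvLoopA_cont cyc me _ hstep1, pvLoopA_cont cyc me _ hstep2]
              exact pvLoopA_mono_le cyc me (by omega) hout
          · -- no options at all
            have hoi0 : (0 : Int) ≥ ((pvOptionsList cyc me l (PySem.Int.mod r (cyc.length : Int))).length : Int) := by
              rw [hopts, if_neg hc1, if_neg hc2]
              simp
            have hc2' : me.contains (pvO2 cyc l (PySem.Int.mod r (cyc.length : Int))) = false := by
              simpa using hc2
            simp only [hc2', Bool.false_eq_true, reduceIte]
            intro out hout
            have hstepNew : pvStep cyc me ⟨l, r, etp, "new", [], 0⟩ rest m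
                = .inr (rest, m.insert (l, PySem.Int.mod r (cyc.length : Int)) false) := by
              rw [pvStep_new cyc me l r etp rest m hm he hge]
              exact pvStep_opts_exhausted cyc me l r etp _ 0 rest m hm he hge hoi0
            rw [show pvFuelA (g + 1) + fl = (2 * pvFuelA g + 3 + fl) + 1 from by simp [pvFuelA]; omega]
            rw [pvLoopA_cont cyc me _ hstepNew]
            exact pvLoopA_mono_le cyc me (by omega) hout


-- ===== VERDICT (by name: the statement is the Claim_ definition above) =====
theorem backtrack_missing_edges_iterative_py_spec : Claim_equal_backtrack_missing_edges_iterative_py := by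
  intro cyc me etp _hdom hpre
  unfold Spec_backtrack_missing_edges_iterative_py
  have hpre' : cyc ≠ [] := hpre
  have hn : 0 < cyc.length := List.length_pos_of_ne_nil hpre'
  have hnpos : (0 : Int) < (cyc.length : Int) := by exact_mod_cast hn
  unfold backtrack_missing_edges_iterative_py backtrack_missing_edges_iterative_py_alt
  have hmodneg : PySem.Int.mod (-1) (cyc.length : Int) = (cyc.length : Int) - 1 := by
    rw [PySem.Int.mod_eq_emod_of_pos hnpos]
    rw [show (-1 : Int) = ((cyc.length : Int) - 1) - (cyc.length : Int) by ring]
    rw [Int.sub_emod_right]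
    exact Int.emod_eq_of_lt (by omega) (by omega)
  have hgap : (PySem.Int.mod (-1) (cyc.length : Int) - 1).toNat ≤ cyc.length := by
    rw [hmodneg]
    omega
  have hnone : (PySem.Dict.empty : PySem.Dict (Int × Int) Bool).get?
      (1, PySem.Int.mod (-1) (cyc.length : Int)) = none := by
    simp [PySem.Dict.get?_empty]
  have haf : ∀ k : Int × Int, (PySem.Dict.empty : PySem.Dict (Int × Int) Bool).get? k ≠ some true := by
    intro k h
    simp [PySem.Dict.get?_empty] at h
  have H := pvSim cyc me hn cyc.length 1 (-1) etp PySem.Dict.empty [] 1 (by norm_num) hgap hnone haf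
  cases hres : pvRec cyc me (cyc.length + 1) 1 (-1) etp PySem.Dict.empty with
  | mk b m' =>
    rw [hres] at H
    cases b with
    | true =>
      try dsimp only at H
      try dsimp only
      try simp only [reduceIte] at H
      rw [H]
      rfl
    | false =>
      try dsimp only at H
      try dsimp only
      try simp only [Bool.false_eq_true, reduceIte] at H
      have h0 : pvLoopA cyc me 1 [] m' = some false := by simp [pvLoopA]
      rw [H false h0]
      rfl
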